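-- pv_equiv track=rewrite | github.com/jameshuang1981/research | code/drug_interaction/python/causal_pie.py | get_pie_A_not_B_time_LL
-- ===== SOURCE A (Python) =====
-- def get_pie_A_not_B_time_LL(pie_A_time_LL, pie_B_time_LL):
--     if not pie_B_time_LL:
--         return pie_A_time_LL
--
--     # Get time_Dic
--     pie_B_time_Dic = {}
--     for pie_B_time_L in pie_B_time_LL:
--         for time in pie_B_time_L:
--             pie_B_time_Dic[time] = 1
--
--     # Get pie_A_not_B_time_LL
--     # Flag, indicating whether we have started recording the timepoints where pie_A is present but pie_B is absent
--     recorded_F = False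
--
--     # Initialization
--     pie_A_not_B_time_LL = []
--
--     for pie_A_time_L in pie_A_time_LL:
--         pie_A_not_B_time_L = []
--         for time in pie_A_time_L:
--             if not time in pie_B_time_Dic:
--                 if not recorded_F:
--                     pie_A_not_B_time_L = []
--                     recorded_F = True
--                 pie_A_not_B_time_L.append(time)
--             else:
--                 if recorded_F:
--                     pie_A_not_B_time_LL.append(pie_A_not_B_time_L)
--                     recorded_F = False
--         if recorded_F:
--             pie_A_not_B_time_LL.append(pie_A_not_B_time_L)
--             recorded_F = False
--     return pie_A_not_B_time_LL
-- ===== SOURCE B (Python) =====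
-- def get_pie_A_not_B_time_LL(pie_A_time_LL, pie_B_time_LL):
--     if not pie_B_time_LL:
--         return pie_A_time_LL
--     b_set = {time for pie_B_time_L in pie_B_time_LL for time in pie_B_time_L}
--     pie_A_not_B_time_LL = []
--     for pie_A_time_L in pie_A_time_LL:
--         n = len(pie_A_time_L)
--         i = 0
--         while i < n:
--             if pie_A_time_L[i] in b_set:
--                 i += 1
--             else:
--                 j = i + 1
--                 while j < n and pie_A_time_L[j] not in b_set:
--                     j += 1
--                 pie_A_not_B_time_LL.append(pie_A_time_L[i:j])
--                 i = j
--     return pie_A_not_B_time_LL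
-- ===== Notes on version B (the rewrite author's own statement) =====
-- stated objective: alternative
-- what changed: Replaces A's cross-list recorded_F flag machinery and incremental run accumulator with a per-list two-pointer scan over indices that extracts each maximal not-in-B run as a single slice, after building the B-times as a set comprehension.
import Mathlib
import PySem

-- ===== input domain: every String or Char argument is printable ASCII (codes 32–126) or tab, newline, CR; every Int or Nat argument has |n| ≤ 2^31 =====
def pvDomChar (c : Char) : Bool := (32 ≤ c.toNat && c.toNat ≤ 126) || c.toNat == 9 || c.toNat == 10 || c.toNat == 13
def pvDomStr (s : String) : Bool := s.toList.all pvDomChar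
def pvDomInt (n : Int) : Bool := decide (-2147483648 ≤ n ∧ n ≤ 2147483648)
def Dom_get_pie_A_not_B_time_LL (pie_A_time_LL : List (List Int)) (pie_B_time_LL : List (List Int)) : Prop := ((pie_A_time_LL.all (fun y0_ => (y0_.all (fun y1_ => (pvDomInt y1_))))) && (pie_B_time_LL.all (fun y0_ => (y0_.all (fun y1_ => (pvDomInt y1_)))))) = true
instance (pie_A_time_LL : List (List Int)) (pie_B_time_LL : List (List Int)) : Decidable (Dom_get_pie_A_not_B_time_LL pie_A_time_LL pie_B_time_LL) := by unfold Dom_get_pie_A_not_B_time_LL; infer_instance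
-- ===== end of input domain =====

-- B replaces A's cross-list recorded_F flag and incremental run accumulator with a per-list
-- two-pointer index scan extracting each maximal not-in-B run as one slice (alternative decomposition).

-- ===== PORT A =====
def get_pie_A_not_B_time_LL (pie_A_time_LL : List (List Int)) (pie_B_time_LL : List (List Int)) : List (List Int) :=
  if pie_B_time_LL = [] then pie_A_time_LL
  else
    let pie_B_time_Dic : PySem.Dict Int Int :=
      pie_B_time_LL.foldl (fun d pie_B_time_L =>
        pie_B_time_L.foldl (fun d time => d.insert time 1) d) PySem.Dict.empty
    -- state: (pie_A_not_B_time_LL, pie_A_not_B_time_L, recorded_F)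
    let st :=
      pie_A_time_LL.foldl
        (fun st pie_A_time_L =>
          let st2 :=
            pie_A_time_L.foldl
              (fun st time =>
                if (pie_B_time_Dic.contains time) = false then
                  (st.1, (if st.2.2 then st.2.1 else ([] : List Int)) ++ [time], true)
                else
                  if st.2.2 then (st.1 ++ [st.2.1], st.2.1, false) else st)
              (st.1, ([] : List Int), st.2.2)
          if st2.2.2 then (st2.1 ++ [st2.2.1], st2.2.1, false) else st2)
        (([] : List (List Int)), ([] : List Int), false)
    st.1

-- ===== PORT B =====
-- inner while loop of Source B: first index k ≥ j with k = len(L) or L[k] in b_set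
def pvScan (s : PySem.Set Int) (L : List Int) (j : Nat) : Nat :=
  if j < L.length ∧ PySem.Set.contains s (PySem.List.pyGetD L (j : Int) 0) = false then
    pvScan s L (j + 1)
  else j
termination_by L.length - j
decreasing_by omega

-- needed by pvChunks' termination argument
theorem pvScan_ge (s : PySem.Set Int) (L : List Int) (j : Nat) : j ≤ pvScan s L j := by
  have H : ∀ k j, L.length - j ≤ k → j ≤ pvScan s L j := by
    intro k
    induction k with
    | zero =>
      intro j hj; rw [pvScan]; split
      · omega
      · exact le_refl j
    | succ k ih =>
      intro j hj; rw [pvScan]; split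
      · rename_i h; exact le_trans (Nat.le_succ j) (ih (j + 1) (by omega))
      · exact le_refl j
  exact H (L.length - j) j le_rfl

-- outer while loop of Source B over index i
def pvChunks (s : PySem.Set Int) (L : List Int) (i : Nat) : List (List Int) :=
  if h : i < L.length then
    if PySem.Set.contains s (PySem.List.pyGetD L (i : Int) 0) then pvChunks s L (i + 1)
    else
      let j := pvScan s L (i + 1)
      PySem.List.slice L (some (i : Int)) (some (j : Int)) :: pvChunks s L j
  else []
termination_by L.length - i
decreasing_by
  · omega
  · have := pvScan_ge s L (i + 1); omega

def get_pie_A_not_B_time_LL_alt (pie_A_time_LL : List (List Int)) (pie_B_time_LL : List (List Int)) : List (List Int) :=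
  if pie_B_time_LL = [] then pie_A_time_LL
  else
    let b_set : PySem.Set Int :=
      pie_B_time_LL.foldl (fun s pie_B_time_L =>
        pie_B_time_L.foldl (fun s time => PySem.Set.add s time) s) PySem.Set.empty
    pie_A_time_LL.foldl (fun out pie_A_time_L => out ++ pvChunks b_set pie_A_time_L 0) []

-- ===== PRECONDITION & SPEC =====
def Spec_get_pie_A_not_B_time_LL (pie_A_time_LL : List (List Int)) (pie_B_time_LL : List (List Int)) (out : List (List Int)) : Prop := out = get_pie_A_not_B_time_LL_alt pie_A_time_LL pie_B_time_LL
instance (pie_A_time_LL : List (List Int)) (pie_B_time_LL : List (List Int)) (out : List (List Int)) : Decidable (Spec_get_pie_A_not_B_time_LL pie_A_time_LL pie_B_time_LL out) := by unfold Spec_get_pie_A_not_B_time_LL; infer_instance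

-- ===== CLAIM (what is proved, stated in full; the proofs are below) =====
def Claim_equal_get_pie_A_not_B_time_LL : Prop := ∀ (pie_A_time_LL : List (List Int)) (pie_B_time_LL : List (List Int)), Dom_get_pie_A_not_B_time_LL pie_A_time_LL pie_B_time_LL → Spec_get_pie_A_not_B_time_LL pie_A_time_LL pie_B_time_LL (get_pie_A_not_B_time_LL pie_A_time_LL pie_B_time_LL)

-- ===== LEMMAS AND PROOFS =====

-- abstract run extraction: maximal runs of elements with m · = false
def gChunks (m : Int → Bool) : List Int → List (List Int)
  | [] => []
  | t :: r =>
    if m t then gChunks m r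
    else (t :: r.takeWhile (fun x => !m x)) :: gChunks m (r.dropWhile (fun x => !m x))
termination_by L => L.length
decreasing_by
  · simp
  · have := List.length_dropWhile_le (fun x => !m x) r
    simp; omega

-- A's per-element step and end-of-list flush, abstracted over the membership test
def gStep (m : Int → Bool) (st : List (List Int) × List Int × Bool) (time : Int) : List (List Int) × List Int × Bool :=
  if (m time) = false then
    (st.1, (if st.2.2 then st.2.1 else ([] : List Int)) ++ [time], true)
  else
    if st.2.2 then (st.1 ++ [st.2.1], st.2.1, false) else st

def gFlush (st : List (List Int) × List Int × Bool) : List (List Int) × List Int × Bool :=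
  if st.2.2 then (st.1 ++ [st.2.1], st.2.1, false) else st

theorem innerA (m : Int → Bool) (L : List Int) :
    (∀ out run, ∃ r', gFlush (L.foldl (gStep m) (out, run, false)) = (out ++ gChunks m L, r', false)) ∧
    (∀ out r, ∃ r', gFlush (L.foldl (gStep m) (out, r, true)) =
      (out ++ (r ++ L.takeWhile (fun x => !m x)) :: gChunks m (L.dropWhile (fun x => !m x)), r', false)) := by
  induction L with
  | nil =>
    constructor
    · intro out run
      exact ⟨run, by simp [gFlush, gChunks]⟩
    · intro out r
      exact ⟨r, by simp [gFlush, gChunks]⟩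
  | cons t L ih =>
    constructor
    · intro out run
      rw [List.foldl_cons]
      cases htm : m t with
      | false =>
        rw [show gStep m (out, run, false) t = (out, [t], true) by simp [gStep, htm]]
        obtain ⟨r', hr⟩ := ih.2 out [t]
        refine ⟨r', hr.trans ?_⟩
        rw [gChunks]
        simp [htm]
      | true =>
        rw [show gStep m (out, run, false) t = (out, run, false) by simp [gStep, htm]]
        obtain ⟨r', hr⟩ := ih.1 out run
        refine ⟨r', hr.trans ?_⟩
        rw [gChunks]
        simp [htm]
    · intro out r
      rw [List.foldl_cons]
      cases htm : m t with
      | false =>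
        rw [show gStep m (out, r, true) t = (out, r ++ [t], true) by simp [gStep, htm]]
        obtain ⟨r', hr⟩ := ih.2 out (r ++ [t])
        refine ⟨r', hr.trans ?_⟩
        simp [htm]
      | true =>
        rw [show gStep m (out, r, true) t = (out ++ [r], r, false) by simp [gStep, htm]]
        obtain ⟨r', hr⟩ := ih.1 (out ++ [r]) r
        refine ⟨r', hr.trans ?_⟩
        simp only [List.takeWhile_cons, List.dropWhile_cons, htm, Bool.not_true, Bool.false_eq_true,
          if_false, List.append_nil]
        rw [gChunks]
        simp [htm]

theorem outerA_key (m : Int → Bool) (A : List (List Int)) : ∀ (out : List (List Int)) (run : List Int),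
    (A.foldl (fun st L => gFlush (L.foldl (gStep m) (st.1, ([] : List Int), st.2.2))) (out, run, false)).1
      = out ++ (A.map (gChunks m)).flatten := by
  induction A with
  | nil => intro out run; simp
  | cons L A ih =>
    intro out run
    rw [List.foldl_cons]
    obtain ⟨r', hr⟩ := (innerA m L).1 out []
    change (List.foldl _ (gFlush (List.foldl (gStep m) (out, [], false) L)) A).1 = _
    rw [hr]
    rw [ih (out ++ gChunks m L) r']
    simp

theorem outerA (m : Int → Bool) (A : List (List Int)) : ∀ (out : List (List Int)) (run : List Int),
    (A.foldl
      (fun st pie_A_time_L =>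
        let st2 :=
          pie_A_time_L.foldl
            (fun st time =>
              if (m time) = false then
                (st.1, (if st.2.2 then st.2.1 else ([] : List Int)) ++ [time], true)
              else
                if st.2.2 then (st.1 ++ [st.2.1], st.2.1, false) else st)
            (st.1, ([] : List Int), st.2.2)
        if st2.2.2 then (st2.1 ++ [st2.2.1], st2.2.1, false) else st2)
      (out, run, false)).1 = out ++ (A.map (gChunks m)).flatten := by
  intro out run
  exact outerA_key m A out run

theorem take_len_takeWhile (p : Int → Bool) (l : List Int) : l.take (l.takeWhile p).length = l.takeWhile p :=
  calc l.take (l.takeWhile p).length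
      = (l.takeWhile p ++ l.dropWhile p).take (l.takeWhile p).length := by rw [List.takeWhile_append_dropWhile]
    _ = l.takeWhile p := List.take_left

theorem drop_len_takeWhile (p : Int → Bool) (l : List Int) : l.drop (l.takeWhile p).length = l.dropWhile p :=
  calc l.drop (l.takeWhile p).length
      = (l.takeWhile p ++ l.dropWhile p).drop (l.takeWhile p).length := by rw [List.takeWhile_append_dropWhile]
    _ = l.dropWhile p := List.drop_left

theorem pvScan_eq (s : PySem.Set Int) (L : List Int) (j : Nat) :
    pvScan s L j = j + ((L.drop j).takeWhile (fun x => !PySem.Set.contains s x)).length := by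
  have H : ∀ k j, L.length - j ≤ k →
      pvScan s L j = j + ((L.drop j).takeWhile (fun x => !PySem.Set.contains s x)).length := by
    intro k
    induction k with
    | zero =>
      intro j hj
      rw [pvScan, List.drop_eq_nil_of_le (by omega)]
      split
      · omega
      · simp only [List.takeWhile_nil, List.length_nil, Nat.add_zero]
    | succ k ih =>
      intro j hj
      rw [pvScan]
      by_cases hjl : j < L.length
      · have hget : PySem.List.pyGetD L (j : Int) 0 = L[j] := by
          simp [PySem.List.pyGetD_natCast, List.getD_eq_getElem?_getD, hjl]
        have hd : L.drop j = L[j] :: L.drop (j + 1) := List.drop_eq_getElem_cons hjl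
        rw [hd, List.takeWhile_cons]
        cases hc : PySem.Set.contains s L[j] with
        | false =>
          rw [if_pos ⟨hjl, by rw [hget]; exact hc⟩, ih (j + 1) (by omega)]
          simp only [Bool.not_false, if_true, List.length_cons]
          omega
        | true =>
          rw [if_neg (by rw [hget, hc]; simp)]
          simp
      · rw [if_neg (by tauto), List.drop_eq_nil_of_le (by omega)]
        simp only [List.takeWhile_nil, List.length_nil, Nat.add_zero]
  exact H (L.length - j) j le_rfl

theorem pvChunks_eq (s : PySem.Set Int) (L : List Int) (i : Nat) :
    pvChunks s L i = gChunks (fun t => PySem.Set.contains s t) (L.drop i) := by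
  have H : ∀ k i, L.length - i ≤ k →
      pvChunks s L i = gChunks (fun t => PySem.Set.contains s t) (L.drop i) := by
    intro k
    induction k with
    | zero =>
      intro i hi
      rw [pvChunks, dif_neg (by omega), List.drop_eq_nil_of_le (by omega), gChunks]
    | succ k ih =>
      intro i hi
      rw [pvChunks]
      by_cases hil : i < L.length
      · rw [dif_pos hil]
        have hget : PySem.List.pyGetD L (i : Int) 0 = L[i] := by
          simp [PySem.List.pyGetD_natCast, List.getD_eq_getElem?_getD, hil]
        have hd : L.drop i = L[i] :: L.drop (i + 1) := List.drop_eq_getElem_cons hil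
        rw [hd, gChunks]
        cases hc : PySem.Set.contains s L[i] with
        | true =>
          rw [if_pos (by rw [hget]; exact hc), if_pos rfl, ih (i + 1) (by omega)]
        | false =>
          rw [if_neg (by rw [hget, hc]; simp), if_neg (by simp)]
          have hscan := pvScan_eq s L (i + 1)
          set kk := ((L.drop (i + 1)).takeWhile (fun x => !PySem.Set.contains s x)).length with hkk
          show PySem.List.slice L (some (i : Int)) (some ((pvScan s L (i + 1) : Nat) : Int)) ::
              pvChunks s L (pvScan s L (i + 1)) = _
          congr 1
          · rw [PySem.List.slice_natCast, hscan, hd]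
            have : i + 1 + kk - i = kk + 1 := by omega
            rw [this, List.take_succ_cons]
            rw [hkk, take_len_takeWhile]
          · rw [ih (pvScan s L (i + 1)) (by have := pvScan_ge s L (i + 1); omega)]
            rw [hscan]
            rw [show L.drop (i + 1 + kk) = (L.drop (i + 1)).drop kk from Eq.symm List.drop_drop]
            rw [hkk, drop_len_takeWhile]
      · rw [dif_neg hil, List.drop_eq_nil_of_le (by omega), gChunks]
  exact H (L.length - i) i le_rfl

theorem mem_fold_set (Bs : List (List Int)) (s : PySem.Set Int) (t : Int) :
    (PySem.Set.contains (Bs.foldl (fun s L => L.foldl (fun s time => PySem.Set.add s time) s) s) t = true) ↔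
      (t ∈ s ∨ ∃ L ∈ Bs, t ∈ L) := by
  induction Bs generalizing s with
  | nil => simp
  | cons L Bs ih =>
    rw [List.foldl_cons]
    rw [show (L.foldl (fun s time => PySem.Set.add s time) s) = PySem.Set.update s L from rfl]
    rw [ih]
    simp [PySem.Set.mem_update]
    tauto

theorem mem_fold_dict (Bs : List (List Int)) (d : PySem.Dict Int Int) (t : Int) :
    ((Bs.foldl (fun d L => L.foldl (fun d time => d.insert time 1) d) d).contains t = true) ↔
      (d.contains t = true ∨ ∃ L ∈ Bs, t ∈ L) := by
  have inner : ∀ (L : List Int) (d : PySem.Dict Int Int),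
      ((L.foldl (fun d time => d.insert time 1) d).contains t = true) ↔ (d.contains t = true ∨ t ∈ L) := by
    intro L
    induction L with
    | nil => simp
    | cons x L ih =>
      intro d
      rw [List.foldl_cons, ih]
      simp [PySem.Dict.contains_insert]
      tauto
  induction Bs generalizing d with
  | nil => simp
  | cons L Bs ih =>
    rw [List.foldl_cons]
    have h1 := ih (L.foldl (fun d time => d.insert time 1) d)
    have h2 := inner L d
    simp only [List.mem_cons, exists_eq_or_imp]
    exact h1.trans ((or_congr h2 Iff.rfl).trans or_assoc)

-- ===== VERDICT (by name: the statement is the Claim_ definition above) =====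
theorem get_pie_A_not_B_time_LL_spec : Claim_equal_get_pie_A_not_B_time_LL := by
  intro A B _dom
  unfold Spec_get_pie_A_not_B_time_LL
  unfold get_pie_A_not_B_time_LL get_pie_A_not_B_time_LL_alt
  by_cases hB : B = []
  · simp [hB]
  · simp only [if_neg hB]
    set D : PySem.Dict Int Int :=
      B.foldl (fun d L => L.foldl (fun d time => d.insert time 1) d) PySem.Dict.empty with hD
    set S : PySem.Set Int :=
      B.foldl (fun s L => L.foldl (fun s time => PySem.Set.add s time) s) PySem.Set.empty with hS
    have hmem : ∀ t, D.contains t = PySem.Set.contains S t := by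
      intro t
      rw [Bool.eq_iff_iff, hD, hS, mem_fold_dict, mem_fold_set]
      simp
    simp only [hmem]
    rw [outerA (fun t => PySem.Set.contains S t) A [] []]
    rw [PySem.List.foldl_append_eq_flatMap (fun L => pvChunks S L 0)]
    have : ∀ L, pvChunks S L 0 = gChunks (fun t => PySem.Set.contains S t) L := by
      intro L
      rw [pvChunks_eq]
      rfl
    simp [List.flatMap_def, this]
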